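-- pv_equiv track=rewrite | github.com/wilseypa/lhf | python_tests/Polytopal_Development/FinalPolytopalImplementation.py | hypercubeincidence
-- ===== SOURCE A (Python) =====
-- def differbyone(pnt1,pnt2):
-- 	cnt=0
-- 	for i in range(0,len(pnt1)):
-- 		if(pnt1[i]!=pnt2[i]):
-- 			cnt=cnt+1
-- 	if(cnt>1):
-- 		return False
-- 	else:
-- 		return True
--
-- def hypercubeincidence(points):
-- 	incidence = []
-- 	for i in range(0,len(points)):
-- 		lst = []
-- 		for j in range(0,len(points)):
-- 			if(differbyone(points[i],points[j])):
-- 				lst.append(1)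
-- 			else:
-- 				lst.append(0)
-- 		incidence.append(lst)
-- 	return incidence
-- ===== SOURCE B (Python) =====
-- def blank(p, k):
--     # p with coordinate k removed
--     return tuple(p[:k] + p[k + 1:])
--
-- def hypercubeincidence(points):
--     n = len(points)
--     if points and len(points[0]) == 0:
--         # zero-dimensional points are all identical: every pair differs in 0 <= 1 coordinates
--         return [[1] * n for _ in range(n)]
--     m = [[0] * n for _ in range(n)]
--     d = len(points[0]) if points else 0
--     for k in range(d):
--         # index: blanked key (coordinate k removed) -> indices of points sharing it;
--         # two points differ in <= 1 coordinate iff they share some blanked key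
--         groups = {}
--         for i in range(n):
--             groups.setdefault(blank(points[i], k), []).append(i)
--         for i in range(n):
--             row = m[i]
--             for j in groups.get(blank(points[i], k), []):
--                 row[j] = 1
--     return m
-- ===== Notes on version B (the rewrite author's own statement) =====
-- stated objective: alternative
-- what changed: B replaces A's all-pairs coordinate-by-coordinate Hamming test by a hash index: for each coordinate k it groups point indices by the point with coordinate k blanked out, then marks matrix entries only for index pairs sharing a blanked key.
import Mathlib
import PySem

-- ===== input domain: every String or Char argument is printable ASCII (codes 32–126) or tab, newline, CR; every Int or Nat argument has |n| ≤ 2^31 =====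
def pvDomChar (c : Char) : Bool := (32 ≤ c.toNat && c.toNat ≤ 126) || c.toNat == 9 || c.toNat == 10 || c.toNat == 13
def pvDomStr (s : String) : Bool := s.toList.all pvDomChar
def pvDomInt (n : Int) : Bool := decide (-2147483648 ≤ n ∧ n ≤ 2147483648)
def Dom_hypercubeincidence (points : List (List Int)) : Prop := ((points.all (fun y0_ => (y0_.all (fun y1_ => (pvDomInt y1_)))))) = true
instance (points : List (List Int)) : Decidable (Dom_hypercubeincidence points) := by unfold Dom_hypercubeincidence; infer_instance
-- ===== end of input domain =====

-- B replaces A's all-pairs mismatch counting by a hash index: for each coordinate k it groups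
-- point indices by the point with coordinate k removed, and marks exactly the index pairs
-- sharing a blanked key (a genuinely different, grouping-based algorithm of similar cost).


-- ===== PORT A =====
-- pnt1[i] / pnt2[i] ported with pyGetD: exact under Pre_ (all points of equal length, so every
-- index drawn from range(len(pnt1)) is in range for pnt2 as well; Python raises IndexError otherwise).
def differbyone (pnt1 pnt2 : List Int) : Bool :=
  let cnt : Int :=
    (PySem.List.pyRange 0 (pnt1.length : Int) 1).foldl
      (fun cnt i =>
        if PySem.List.pyGetD pnt1 i 0 ≠ PySem.List.pyGetD pnt2 i 0 then cnt + 1 else cnt) 0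
  if cnt > 1 then false else true

def hypercubeincidence (points : List (List Int)) : List (List Int) :=
  (PySem.List.pyRange 0 (points.length : Int) 1).foldl
    (fun incidence i =>
      let lst :=
        (PySem.List.pyRange 0 (points.length : Int) 1).foldl
          (fun lst j =>
            if differbyone (PySem.List.pyGetD points i []) (PySem.List.pyGetD points j []) then
              lst ++ [(1 : Int)]
            else
              lst ++ [(0 : Int)]) []
      incidence ++ [lst]) []

-- ===== PORT B =====
-- blank(p, k) = tuple(p[:k] + p[k+1:]): both slice bounds are nonnegative here (k : Nat), where
-- Python's p[:k] is exactly List.take k and p[k+1:] is exactly List.drop (k+1).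
def blankKey (p : List Int) (k : Nat) : List Int := p.take k ++ p.drop (k + 1)

-- groups.setdefault(key, []).append(i) is Dict.modify key [] (· ++ [i]) (d[key] = d.get(key, []) + [i],
-- insertion order preserved); groups.get(key, []) is Dict.getD; m[i][j] = 1 is List.set on the row;
-- the final matrix is read back row by row.
def hypercubeincidence_alt (points : List (List Int)) : List (List Int) :=
  let n := points.length
  if n ≠ 0 ∧ (points.headD []).length = 0 then
    List.replicate n (List.replicate n (1 : Int))
  else
    let d := if points.isEmpty then 0 else (points.headD []).length
    let m0 := List.replicate n (List.replicate n (0 : Int))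
    (List.range d).foldl
      (fun m k =>
        let groups : PySem.Dict (List Int) (List Nat) :=
          (List.range n).foldl
            (fun g i => g.modify (blankKey (points.getD i []) k) [] (· ++ [i]))
            PySem.Dict.empty
        (List.range n).foldl
          (fun m i =>
            m.set i ((groups.getD (blankKey (points.getD i []) k) []).foldl
              (fun row j => row.set j (1 : Int)) (m.getD i []))) m) m0

-- ===== PRECONDITION & SPEC =====
-- Pre_ excludes exactly the inputs with two points of different lengths, on which A raises
-- IndexError (indexing a shorter point with the longer point's range); A returns everywhere else.
def Pre_hypercubeincidence (points : List (List Int)) : Prop :=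
  ∀ p ∈ points, ∀ q ∈ points, p.length = q.length
instance (points : List (List Int)) : Decidable (Pre_hypercubeincidence points) := by
  unfold Pre_hypercubeincidence; infer_instance

def pvWitness_hypercubeincidence : List (List Int) := [[0, 0], [0, 1], [1, 1]]

def Spec_hypercubeincidence (points : List (List Int)) (out : List (List Int)) : Prop := out = hypercubeincidence_alt points
instance (points : List (List Int)) (out : List (List Int)) : Decidable (Spec_hypercubeincidence points out) := by unfold Spec_hypercubeincidence; infer_instance

-- ===== CLAIM (what is proved, stated in full; the proofs are below) =====
def Claim_equal_hypercubeincidence : Prop := ∀ (points : List (List Int)), Dom_hypercubeincidence points → Pre_hypercubeincidence points → Spec_hypercubeincidence points (hypercubeincidence points)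

-- ===== LEMMAS AND PROOFS =====

/-- Number of positions where two (equal-length) lists differ. -/
def diffCount : List Int → List Int → Nat
  | [], _ => 0
  | _, [] => 0
  | a :: p, b :: q => (if a = b then 0 else 1) + diffCount p q

lemma diffCount_eq_zero_iff :
    ∀ (p q : List Int), p.length = q.length → (diffCount p q = 0 ↔ p = q) := by
  intro p
  induction p with
  | nil => intro q h; cases q <;> simp [diffCount] at h ⊢
  | cons a p ih =>
    intro q h
    cases q with
    | nil => simp at h
    | cons b q =>
      simp only [List.length_cons, Nat.add_right_cancel_iff] at h
      by_cases hab : a = b <;> simp [diffCount, hab, ih q h]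

lemma countP_range_eq_diffCount :
    ∀ (p q : List Int), p.length = q.length →
      (List.range p.length).countP (fun k => decide (p.getD k 0 ≠ q.getD k 0)) = diffCount p q := by
  intro p
  induction p with
  | nil => intro q h; simp [diffCount]
  | cons a p ih =>
    intro q h
    cases q with
    | nil => simp at h
    | cons b q =>
      simp only [List.length_cons, Nat.add_right_cancel_iff] at h
      rw [List.length_cons, List.range_succ_eq_map, List.countP_cons, List.countP_map]
      have : ((fun k => decide ((a :: p).getD k 0 ≠ (b :: q).getD k 0)) ∘ fun k => k + 1)
          = (fun k => decide (p.getD k 0 ≠ q.getD k 0)) := by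
        funext k; simp [List.getD]
      rw [this, ih q h]
      by_cases hab : a = b <;> (simp [diffCount, hab, List.getD]; try omega)

lemma differbyone_eq (p q : List Int) (h : p.length = q.length) :
    differbyone p q = decide (diffCount p q ≤ 1) := by
  unfold differbyone
  rw [PySem.List.pyRange_zero_nat p.length, List.foldl_map]
  have hcong : List.foldl
      (fun (cnt : Int) (k : Nat) =>
        if PySem.List.pyGetD p (↑k) 0 ≠ PySem.List.pyGetD q (↑k) 0 then cnt + 1 else cnt) 0
      (List.range p.length)
      = List.foldl
      (fun (cnt : Int) (k : Nat) =>
        if (fun k => decide (p.getD k 0 ≠ q.getD k 0)) k then cnt + 1 else cnt) 0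
      (List.range p.length) := by
    apply PySem.List.foldl_congr_mem
    intro acc k _
    simp [PySem.List.pyGetD_natCast]
  rw [hcong, PySem.List.foldl_count_if, countP_range_eq_diffCount p q h]
  by_cases hle : diffCount p q ≤ 1
  · simp [hle]
    try omega
  · simp [hle]
    try omega

lemma entry_eq (p q : List Int) (h : p.length = q.length) :
    (if differbyone p q then (1 : Int) else 0) = if diffCount p q ≤ 1 then (1 : Int) else 0 := by
  rw [differbyone_eq p q h]
  by_cases hle : diffCount p q ≤ 1 <;> simp [hle]

lemma row_eq (points : List (List Int)) (p : List Int) :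
    (PySem.List.pyRange 0 (points.length : Int) 1).foldl
      (fun lst j =>
        if differbyone p (PySem.List.pyGetD points j []) then lst ++ [(1 : Int)]
        else lst ++ [(0 : Int)]) []
      = points.map (fun q => if differbyone p q then (1 : Int) else 0) := by
  have h1 : (PySem.List.pyRange 0 (points.length : Int) 1).foldl
      (fun lst j =>
        if differbyone p (PySem.List.pyGetD points j []) then lst ++ [(1 : Int)]
        else lst ++ [(0 : Int)]) []
      = (PySem.List.pyRange 0 (points.length : Int) 1).foldl
      (fun lst j => lst ++ [if differbyone p (PySem.List.pyGetD points j []) then (1 : Int) else 0]) [] := by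
    apply PySem.List.foldl_congr_mem
    intro acc j _
    split <;> rfl
  rw [h1, PySem.List.foldl_append_singleton_eq_map]
  have h2 : (PySem.List.pyRange 0 (points.length : Int) 1).map
      (fun j => if differbyone p (PySem.List.pyGetD points j []) then (1 : Int) else 0)
      = ((PySem.List.pyRange 0 (points.length : Int) 1).map
          (fun j => PySem.List.pyGetD points j [])).map
        (fun q => if differbyone p q then (1 : Int) else 0) := by
    rw [List.map_map]; rfl
  rw [List.nil_append, h2]
  have h3 := PySem.List.map_pyGetD_pyRange_zero points ([] : List Int)
  simp only [PySem.List.len_eq] at h3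
  rw [h3]

lemma hypercubeincidence_eq_map (points : List (List Int)) :
    hypercubeincidence points
      = points.map (fun p => points.map (fun q => if differbyone p q then (1 : Int) else 0)) := by
  unfold hypercubeincidence
  have h1 : (PySem.List.pyRange 0 (points.length : Int) 1).foldl
      (fun incidence i =>
        incidence ++ [(PySem.List.pyRange 0 (points.length : Int) 1).foldl
          (fun lst j =>
            if differbyone (PySem.List.pyGetD points i []) (PySem.List.pyGetD points j []) then
              lst ++ [(1 : Int)]
            else lst ++ [(0 : Int)]) []]) []
      = (PySem.List.pyRange 0 (points.length : Int) 1).map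
          (fun i => (PySem.List.pyRange 0 (points.length : Int) 1).foldl
            (fun lst j =>
              if differbyone (PySem.List.pyGetD points i []) (PySem.List.pyGetD points j []) then
                lst ++ [(1 : Int)]
              else lst ++ [(0 : Int)]) []) := by
    rw [PySem.List.foldl_append_singleton_eq_map, List.nil_append]
  rw [h1]
  have h2 : (PySem.List.pyRange 0 (points.length : Int) 1).map
      (fun i => (PySem.List.pyRange 0 (points.length : Int) 1).foldl
        (fun lst j =>
          if differbyone (PySem.List.pyGetD points i []) (PySem.List.pyGetD points j []) then
            lst ++ [(1 : Int)]
          else lst ++ [(0 : Int)]) [])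
      = ((PySem.List.pyRange 0 (points.length : Int) 1).map
          (fun i => PySem.List.pyGetD points i [])).map
        (fun p => (PySem.List.pyRange 0 (points.length : Int) 1).foldl
          (fun lst j =>
            if differbyone p (PySem.List.pyGetD points j []) then lst ++ [(1 : Int)]
            else lst ++ [(0 : Int)]) []) := by
    rw [List.map_map]; rfl
  rw [h2]
  have h3 := PySem.List.map_pyGetD_pyRange_zero points ([] : List Int)
  simp only [PySem.List.len_eq] at h3
  rw [h3]
  apply List.map_congr_left
  intro p _
  exact row_eq points p

-- ---- B-side lemmas ----

theorem fso (idxs : List Nat) :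
    ∀ (row : List Int) (j : Nat),
      (idxs.foldl (fun r j => r.set j (1 : Int)) row)[j]?
        = if j ∈ idxs ∧ j < row.length then some (1 : Int) else row[j]? := by
  induction idxs with
  | nil => intro row j; simp
  | cons a idxs ih =>
    intro row j
    rw [List.foldl_cons, ih (row.set a 1) j]
    simp only [List.length_set, List.getElem?_set, List.mem_cons]
    by_cases hj : j < row.length
    · by_cases haj : a = j
      · subst haj
        by_cases hm : a ∈ idxs <;> simp [hm, hj]
      · by_cases hm : j ∈ idxs <;> simp [hm, hj, haj, Ne.symm haj]
    · have : row[j]? = none := List.getElem?_eq_none (by omega)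
      by_cases hm : j ∈ idxs <;> by_cases haj : a = j <;> simp_all <;> omega

theorem fsr (n : Nat) (g : Nat → List Int) (f : Nat → List Int → List Int) :
    ∀ (t : Nat), t ≤ n →
      (List.range t).foldl (fun m i => m.set i (f i (m.getD i []))) ((List.range n).map g)
        = (List.range n).map (fun i => if i < t then f i (g i) else g i) := by
  intro t
  induction t with
  | zero => intro _; simp
  | succ t ih =>
    intro ht
    rw [List.range_succ, List.foldl_append, List.foldl_cons, List.foldl_nil, ih (by omega)]
    have hget : (((List.range n).map fun i => if i < t then f i (g i) else g i).getD t [])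
        = g t := by
      rw [List.getD_eq_getElem?_getD]
      rw [List.getElem?_map]
      rw [List.getElem?_range (by omega : t < n)]
      simp
    rw [hget]
    apply List.ext_getElem?
    intro i
    simp only [List.getElem?_set, List.getElem?_map, List.length_map,
      List.length_range]
    by_cases hit : t = i
    · subst hit
      have : t < n := by omega
      simp [this]
    · simp only [hit, if_false]
      by_cases hi : i < n
      · rw [List.getElem?_range hi]
        have h3 : (i ≤ t) ↔ (i < t) := by omega
        simp [h3]
      · rw [List.getElem?_eq_none (by simpa using hi)]
        simp

def matP (n : Nat) (P : Nat → Nat → Bool) : List (List Int) :=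
  (List.range n).map (fun i => (List.range n).map (fun j => if P i j then (1 : Int) else 0))

theorem matP_congr (n : Nat) (P Q : Nat → Nat → Bool)
    (h : ∀ i < n, ∀ j < n, P i j = Q i j) : matP n P = matP n Q := by
  unfold matP
  apply List.map_congr_left
  intro i hi
  apply List.map_congr_left
  intro j hj
  rw [h i (List.mem_range.mp hi) j (List.mem_range.mp hj)]

theorem ggd (n : Nat) (bk : Nat → List Int) (c : List Int) :
    (((List.range n).foldl
        (fun (g : PySem.Dict (List Int) (List Nat)) i => g.modify (bk i) [] (· ++ [i]))
        PySem.Dict.empty).getD c [])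
      = (List.range n).filter (fun j => bk j == c) := by
  have h : (List.range n).foldl
      (fun (g : PySem.Dict (List Int) (List Nat)) i => g.modify (bk i) [] (· ++ [i]))
      PySem.Dict.empty
      = ((List.range n).map (fun i => (bk i, i))).foldl
          (fun d p => d.modify p.1 [] (· ++ [p.2])) PySem.Dict.empty := by
    rw [List.foldl_map]
  rw [h, PySem.Dict.getD_foldl_modify_append, List.filter_map, List.map_map]
  simp [Function.comp_def]

theorem pass_eq (n : Nat) (bk : Nat → List Int) (P : Nat → Nat → Bool)
    (groups : PySem.Dict (List Int) (List Nat))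
    (hg : ∀ c, groups.getD c [] = (List.range n).filter (fun j => bk j == c)) :
    (List.range n).foldl
      (fun m i =>
        m.set i ((groups.getD (bk i) []).foldl
          (fun row j => row.set j (1 : Int)) (m.getD i []))) (matP n P)
      = matP n (fun i j => P i j || (bk j == bk i)) := by
  have hcong : (List.range n).foldl
      (fun m i =>
        m.set i ((groups.getD (bk i) []).foldl
          (fun row j => row.set j (1 : Int)) (m.getD i []))) (matP n P)
      = (List.range n).foldl
      (fun m i =>
        m.set i ((fun i row => ((List.range n).filter (fun j => bk j == bk i)).foldl
          (fun row j => row.set j (1 : Int)) row) i (m.getD i []))) (matP n P) := by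
    apply PySem.List.foldl_congr_mem
    intro m i _
    rw [hg (bk i)]
  rw [hcong]
  unfold matP
  rw [fsr n (fun i => (List.range n).map (fun j => if P i j then (1 : Int) else 0))
      (fun i row => ((List.range n).filter (fun j => bk j == bk i)).foldl
        (fun row j => row.set j (1 : Int)) row) n (le_refl n)]
  apply List.map_congr_left
  intro i hi
  have hi' : i < n := List.mem_range.mp hi
  simp only [hi', if_true]
  apply List.ext_getElem?
  intro j
  rw [fso]
  by_cases hj : j < n
  · simp only [List.length_map, List.length_range, List.mem_filter, List.mem_range, hj,
      true_and, and_true, List.getElem?_map, List.getElem?_range hj]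
    by_cases he : bk j == bk i
    · simp only [he]
      simp [eq_of_beq he]
    · have hne : bk j ≠ bk i := by simpa using he
      simp [hne]
  · simp only [List.length_map, List.length_range]
    rw [List.getElem?_eq_none (by simpa using hj), List.getElem?_eq_none (by simpa using hj)]
    simp [hj]

theorem passes_eq (n : Nat) (pts : Nat → List Int) :
    ∀ (ks : List Nat) (P : Nat → Nat → Bool),
    ks.foldl
      (fun m k =>
        let groups : PySem.Dict (List Int) (List Nat) :=
          (List.range n).foldl
            (fun g i => g.modify (blankKey (pts i) k) [] (· ++ [i]))
            PySem.Dict.empty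
        (List.range n).foldl
          (fun m i =>
            m.set i ((groups.getD (blankKey (pts i) k) []).foldl
              (fun row j => row.set j (1 : Int)) (m.getD i []))) m) (matP n P)
      = matP n (fun i j => P i j || ks.any (fun k => blankKey (pts j) k == blankKey (pts i) k)) := by
  intro ks
  induction ks with
  | nil =>
    intro P
    simp only [List.foldl_nil]
    apply matP_congr
    intro i _ j _
    simp
  | cons k ks ih =>
    intro P
    rw [List.foldl_cons]
    have hstep : (List.range n).foldl
        (fun m i =>
          m.set i (((((List.range n).foldl
              (fun g i => g.modify (blankKey (pts i) k) [] (· ++ [i]))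
              PySem.Dict.empty)).getD (blankKey (pts i) k) []).foldl
            (fun row j => row.set j (1 : Int)) (m.getD i []))) (matP n P)
        = matP n (fun i j => P i j || (blankKey (pts j) k == blankKey (pts i) k)) := by
      apply pass_eq n (fun i => blankKey (pts i) k) P
      intro c
      exact ggd n (fun i => blankKey (pts i) k) c
    rw [hstep, ih]
    apply matP_congr
    intro i _ j _
    rw [List.any_cons, Bool.or_assoc]

theorem blankKey_cons (a : Int) (p : List Int) (k : Nat) :
    blankKey (a :: p) (k + 1) = a :: blankKey p k := by
  simp [blankKey]

theorem blankKey_cons_zero (a : Int) (p : List Int) :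
    blankKey (a :: p) 0 = p := by
  simp [blankKey]

theorem blank_imp : ∀ (p q : List Int), p.length = q.length →
    ∀ k, blankKey p k = blankKey q k → diffCount p q ≤ 1 := by
  intro p
  induction p with
  | nil =>
    intro q h k _
    cases q <;> simp_all [diffCount]
  | cons a p ih =>
    intro q h k hbk
    cases q with
    | nil => simp at h
    | cons b q =>
      simp only [List.length_cons, Nat.add_right_cancel_iff] at h
      cases k with
      | zero =>
        rw [blankKey_cons_zero, blankKey_cons_zero] at hbk
        have : diffCount p q = 0 := (diffCount_eq_zero_iff p q h).mpr hbk
        simp [diffCount, this]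
        split <;> omega
      | succ k =>
        rw [blankKey_cons, blankKey_cons] at hbk
        obtain ⟨hab, htl⟩ := List.cons_eq_cons.mp hbk
        have := ih q h k htl
        simp [diffCount, hab]
        omega

theorem blank_rev : ∀ (p q : List Int), p.length = q.length → 0 < p.length →
    diffCount p q ≤ 1 → ∃ k < p.length, blankKey p k = blankKey q k := by
  intro p
  induction p with
  | nil => intro q h hd; simp at hd
  | cons a p ih =>
    intro q h _ hdc
    cases q with
    | nil => simp at h
    | cons b q =>
      simp only [List.length_cons, Nat.add_right_cancel_iff] at h
      by_cases hab : a = b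
      · cases p with
        | nil =>
          have hq : q = [] := by cases q <;> simp_all
          exact ⟨0, by simp, by simp [blankKey_cons_zero, hq]⟩
        | cons a' p' =>
          have hdc' : diffCount (a' :: p') q ≤ 1 := by
            simp [diffCount, hab] at hdc
            simpa [diffCount] using hdc
          obtain ⟨k, hk, hbk⟩ := ih q h (by simp) hdc'
          exact ⟨k + 1, by simpa using hk, by rw [blankKey_cons, blankKey_cons, hab, hbk]⟩
      · have h0 : diffCount p q = 0 := by
          simp [diffCount, hab] at hdc
          omega
        have := (diffCount_eq_zero_iff p q h).mp h0
        exact ⟨0, by simp, by rw [blankKey_cons_zero, blankKey_cons_zero, this]⟩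

theorem exists_blank_iff (p q : List Int) (h : p.length = q.length) (hd : 0 < p.length) :
    ((List.range p.length).any (fun k => blankKey q k == blankKey p k))
      = decide (diffCount p q ≤ 1) := by
  by_cases hdc : diffCount p q ≤ 1
  · obtain ⟨k, hk, hbk⟩ := blank_rev p q h hd hdc
    simp only [hdc, decide_true]
    rw [List.any_eq_true]
    exact ⟨k, List.mem_range.mpr hk, by simp [hbk]⟩
  · simp only [hdc, decide_false]
    rw [List.any_eq_false]
    intro k _
    simp only [beq_iff_eq]
    intro hbk
    have hdq : diffCount q p ≤ 1 := blank_imp q p h.symm k hbk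
    -- diffCount is symmetric
    have hsym : ∀ (p q : List Int), diffCount p q = diffCount q p := by
      intro p
      induction p with
      | nil => intro q; cases q <;> simp [diffCount]
      | cons a p ih =>
        intro q
        cases q with
        | nil => simp [diffCount]
        | cons b q => simp [diffCount, ih q, eq_comm]
    rw [hsym q p] at hdq
    omega

theorem map_eq_range_map {α : Type} (l : List (List Int)) (g : List Int → α) :
    l.map g = (List.range l.length).map (fun i => g (l.getD i [])) := by
  apply List.ext_getElem (by simp)
  intro i h1 h2
  simp only [List.getElem_map, List.getElem_range]
  rw [List.getD_eq_getElem l [] (by simpa using h1)]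

theorem alt_eq (points : List (List Int))
    (hpre : ∀ p ∈ points, ∀ q ∈ points, p.length = q.length) :
    hypercubeincidence_alt points
      = points.map (fun p => points.map (fun q => if diffCount p q ≤ 1 then (1 : Int) else 0)) := by
  cases points with
  | nil => rfl
  | cons p0 tl =>
    have hmem0 : p0 ∈ p0 :: tl := List.mem_cons_self ..
    by_cases h0 : p0.length = 0
    · -- zero-dimensional branch: every point is []
      have hall : ∀ p ∈ p0 :: tl, p = [] := by
        intro p hp
        have := hpre p hp p0 hmem0
        rw [h0] at this
        exact List.eq_nil_of_length_eq_zero this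
      unfold hypercubeincidence_alt
      rw [if_pos (by simp [h0])]
      symm
      rw [List.eq_replicate_iff]
      refine ⟨by simp, ?_⟩
      intro row hrow
      rw [List.mem_map] at hrow
      obtain ⟨p, hp, rfl⟩ := hrow
      rw [List.eq_replicate_iff]
      refine ⟨by simp, ?_⟩
      intro x hx
      rw [List.mem_map] at hx
      obtain ⟨q, hq, rfl⟩ := hx
      rw [hall p hp, hall q hq]
      simp [diffCount]
    · -- positive dimension
      set pts : List (List Int) := p0 :: tl with hpts
      unfold hypercubeincidence_alt
      rw [if_neg (by simp [hpts, h0])]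
      rw [show (if pts.isEmpty = true then 0 else (pts.headD []).length) = p0.length from by
        simp [hpts]]
      have hm0 : List.replicate pts.length (List.replicate pts.length (0 : Int))
          = matP pts.length (fun _ _ => false) := by
        simp [matP, List.map_const']
      rw [hm0, passes_eq pts.length (fun i => pts.getD i [])]
      have hget : ∀ i < pts.length, pts.getD i [] ∈ pts := by
        intro i hi
        rw [List.getD_eq_getElem pts [] hi]
        exact List.getElem_mem hi
      have hlen : ∀ i < pts.length, (pts.getD i []).length = p0.length := by
        intro i hi
        exact hpre _ (hget i hi) p0 (by simp [hpts])
      have hstep : matP pts.length (fun i j => false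
            || (List.range p0.length).any
                 (fun k => blankKey (pts.getD j []) k == blankKey (pts.getD i []) k))
          = matP pts.length
              (fun i j => decide (diffCount (pts.getD i []) (pts.getD j []) ≤ 1)) := by
        apply matP_congr
        intro i hi j hj
        rw [Bool.false_or, ← hlen i hi,
          exists_blank_iff (pts.getD i []) (pts.getD j [])
            (by rw [hlen i hi, hlen j hj]) (by rw [hlen i hi]; omega)]
      rw [hstep]
      rw [map_eq_range_map pts (fun p => pts.map (fun q => if diffCount p q ≤ 1 then (1 : Int) else 0))]
      unfold matP
      apply List.map_congr_left
      intro i _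
      rw [map_eq_range_map pts (fun q => if diffCount (pts.getD i []) q ≤ 1 then (1 : Int) else 0)]
      apply List.map_congr_left
      intro j _
      simp

-- ===== VERDICT (by name: the statement is the Claim_ definition above) =====
theorem hypercubeincidence_spec : Claim_equal_hypercubeincidence := by
  intro points _ hpre
  unfold Spec_hypercubeincidence
  rw [hypercubeincidence_eq_map, alt_eq points hpre]
  apply List.map_congr_left
  intro p hp
  apply List.map_congr_left
  intro q hq
  exact entry_eq p q (hpre p hp q hq)
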